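-- pv_equiv track=rewrite | github.com/mmprotest/villanibench | suites/core_v0_1/tasks/VB-VER-001/repo/src/importer/csv_import.py | import_users
-- ===== SOURCE A (Python) =====
-- def import_users(lines: list[str]) -> list[dict[str, str]]:
--     users: list[dict[str, str]] = []
--     for line in lines:
--         parts = [p.strip() for p in line.split(",")]
--         if len(parts) != 2 or not parts[0] or not parts[1]:
--             # BUG: one bad row stops the entire import.
--             break
--         users.append({"name": parts[0], "email": parts[1]})
--     return users
-- ===== SOURCE B (Python) =====
-- def import_users(lines: list[str]) -> list[dict[str, str]]:
--     parsed = [[p.strip() for p in line.split(",")] for line in lines]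
--     bad = next((i for i, p in enumerate(parsed)
--                 if len(p) != 2 or not p[0] or not p[1]), len(parsed))
--     return [{"name": p[0], "email": p[1]} for p in parsed[:bad]]
-- ===== Notes on version B (the rewrite author's own statement) =====
-- stated objective: alternative
-- what changed: Replaces the imperative loop-with-break by a parse-all / find-first-bad-index / slice-and-map pipeline (three declarative passes instead of one loop with mutation and break).
import Mathlib
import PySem

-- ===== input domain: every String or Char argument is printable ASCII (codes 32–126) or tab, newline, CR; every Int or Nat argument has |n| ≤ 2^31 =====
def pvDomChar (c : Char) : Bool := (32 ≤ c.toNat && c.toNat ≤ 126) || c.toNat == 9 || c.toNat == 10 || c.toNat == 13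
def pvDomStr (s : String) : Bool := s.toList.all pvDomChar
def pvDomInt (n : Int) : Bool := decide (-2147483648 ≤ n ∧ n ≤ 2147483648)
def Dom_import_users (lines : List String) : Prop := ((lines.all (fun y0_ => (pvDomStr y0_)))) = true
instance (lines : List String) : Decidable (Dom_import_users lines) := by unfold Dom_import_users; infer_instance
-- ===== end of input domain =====

-- B replaces A's loop-with-break by a parse-all / find-first-bad-index / slice-and-map pipeline; same values, no speed claim.

-- ===== PORT A =====
-- A's for-loop with break, as the obvious structural recursion building the list front-to-back.
def import_users (lines : List String) : List (List (String × String)) :=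
  match lines with
  | [] => []
  | line :: rest =>
    let parts := ((PySem.Str.split? line ",").getD []).map PySem.Str.strip
    if parts.length ≠ 2 ∨ parts.getD 0 "" = "" ∨ parts.getD 1 "" = "" then
      []
    else
      [("name", parts.getD 0 ""), ("email", parts.getD 1 "")] :: import_users rest

-- ===== PORT B =====
def import_users_alt (lines : List String) : List (List (String × String)) :=
  let parsed := lines.map (fun line => ((PySem.Str.split? line ",").getD []).map PySem.Str.strip)
  let bad := parsed.findIdx (fun p => decide (p.length ≠ 2) || (p.getD 0 "" == "") || (p.getD 1 "" == ""))
  (parsed.take bad).map (fun p => [("name", p.getD 0 ""), ("email", p.getD 1 "")])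

-- ===== PRECONDITION & SPEC =====
def Spec_import_users (lines : List String) (out : List (List (String × String))) : Prop := out = import_users_alt lines
instance (lines : List String) (out : List (List (String × String))) : Decidable (Spec_import_users lines out) := by unfold Spec_import_users; infer_instance

-- ===== CLAIM (what is proved, stated in full; the proofs are below) =====
def Claim_equal_import_users : Prop := ∀ (lines : List String), Dom_import_users lines → Spec_import_users lines (import_users lines)

-- ===== LEMMAS AND PROOFS =====
theorem import_users_eq_alt (lines : List String) : import_users lines = import_users_alt lines := by
  induction lines with
  | nil => rfl
  | cons line rest ih =>
    simp only [import_users, import_users_alt, List.map_cons, List.findIdx_cons,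
      List.getD_eq_getElem?_getD]
    set parts := (List.map PySem.Str.strip ((PySem.Str.split? line ",").getD [])) with hp
    split_ifs with h
    · have hb : (!decide (parts.length = 2) || parts[0]?.getD "" == "" || parts[1]?.getD "" == "") = true := by
        rcases h with h | h | h <;> simp [h]
      simp [hb]
    · push Not at h
      obtain ⟨h1, h2, h3⟩ := h
      have hb : (!decide (parts.length = 2) || parts[0]?.getD "" == "" || parts[1]?.getD "" == "") = false := by
        simp only [h1, decide_true, Bool.not_true, Bool.false_or, Bool.or_eq_false_iff,
          beq_eq_false_iff_ne]
        exact ⟨h2, h3⟩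
      simp only [import_users_alt, List.getD_eq_getElem?_getD] at ih
      simp [hb, List.take_succ_cons, List.findIdx_map, List.map_take, List.map_map, ih]

-- ===== VERDICT (by name: the statement is the Claim_ definition above) =====
theorem import_users_spec : Claim_equal_import_users := by
  intro lines _
  exact import_users_eq_alt lines
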